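-- pv_equiv track=rewrite | github.com/comery/Bamsnap-LRS | src/bamsnap_lrs/layout.py | assign_stacks
-- ===== SOURCE A (Python) =====
-- from typing import List, Tuple
--
-- def assign_stacks(read_spans: List[Tuple[int, int]], max_stack: int) -> List[int]:
--     stacks: List[List[Tuple[int, int]]] = [[] for _ in range(max_stack)]
--     res: List[int] = []
--     for s, e in read_spans:
--         placed = -1
--         for i in range(max_stack):
--             if not stacks[i] or stacks[i][-1][1] <= s:
--                 stacks[i].append((s, e))
--                 placed = i
--                 break
--         if placed == -1:
--             res.append(max_stack - 1)
--         else: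
--             res.append(placed)
--     return res
-- ===== SOURCE B (Python) =====
-- from typing import List, Tuple
--
-- NEG = -(1 << 62)  # below any Dom value: an empty track accepts every start
--
-- def _build(k: int):
--     # tree node = (min_of_last_ends, leaf_count, left, right); leaf = (val, 1, None, None)
--     if k == 1:
--         return (NEG, 1, None, None)
--     h = k // 2
--     return (NEG, k, _build(h), _build(k - h))
--
-- def _query(t, s: int):
--     # leftmost leaf index with value <= s, or None
--     mn, sz, l, r = t
--     if mn > s:
--         return None
--     if sz == 1:
--         return 0
--     ql = _query(l, s)
--     if ql is not None:
--         return ql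
--     qr = _query(r, s)
--     if qr is None:
--         return None
--     return l[1] + qr
--
-- def _update(t, i: int, v: int):
--     mn, sz, l, r = t
--     if sz == 1:
--         return (v, 1, None, None)
--     if i < l[1]:
--         l = _update(l, i, v)
--     else:
--         r = _update(r, i - l[1], v)
--     return (min(l[0], r[0]), sz, l, r)
--
-- def assign_stacks(read_spans: List[Tuple[int, int]], max_stack: int) -> List[int]:
--     if max_stack <= 0:
--         return [max_stack - 1] * len(read_spans)
--     t = _build(max_stack)
--     res: List[int] = []
--     for s, e in read_spans:
--         i = _query(t, s)
--         if i is None: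
--             res.append(max_stack - 1)
--         else:
--             t = _update(t, i, e)
--             res.append(i)
--     return res
-- ===== Notes on version B (the rewrite author's own statement) =====
-- stated objective: alternative
-- what changed: A scans all max_stack tracks linearly for the first one whose last end <= start; B keeps the tracks' last ends in a segment tree of minima and finds the leftmost fitting track by a logarithmic descent with a point update (O(n log max_stack) placements vs O(n*max_stack), though the tree's constant factor makes it slower when max_stack is small).
import Mathlib
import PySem

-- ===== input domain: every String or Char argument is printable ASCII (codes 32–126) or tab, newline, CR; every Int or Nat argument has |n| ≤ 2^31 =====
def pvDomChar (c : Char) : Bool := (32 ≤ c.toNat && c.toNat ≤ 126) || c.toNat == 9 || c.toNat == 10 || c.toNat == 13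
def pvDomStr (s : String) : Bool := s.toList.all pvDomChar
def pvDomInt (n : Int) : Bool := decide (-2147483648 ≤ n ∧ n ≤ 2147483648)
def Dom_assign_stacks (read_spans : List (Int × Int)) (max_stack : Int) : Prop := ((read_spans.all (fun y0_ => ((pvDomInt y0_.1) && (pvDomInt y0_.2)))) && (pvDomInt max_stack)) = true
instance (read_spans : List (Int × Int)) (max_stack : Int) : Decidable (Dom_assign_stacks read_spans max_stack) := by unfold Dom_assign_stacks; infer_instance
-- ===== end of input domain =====

-- B replaces A's linear first-fit scan over all max_stack tracks by a segment tree of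
-- per-track last ends (leftmost-index-with-end≤start query + point update); same return value.

-- ===== PORT A =====
-- inner 'for i in range(max_stack): … break' of A, over the remaining index list;
-- returns (updated stacks, placed)
def assignFindA (stks : List (List (Int × Int))) (s e : Int) : List Int → (List (List (Int × Int)) × Int)
  | [] => (stks, -1)
  | i :: rest =>
    let row := PySem.List.pyGetD stks i []
    match row.getLast? with
    | none => (stks.set i.toNat (row ++ [(s, e)]), i)   -- 'not stacks[i]' branch
    | some p =>
      if p.2 ≤ s then (stks.set i.toNat (row ++ [(s, e)]), i)
      else assignFindA stks s e rest

-- outer 'for s, e in read_spans' loop of A (res.append ⇒ cons)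
def assignLoopA (max_stack : Int) : List (List (Int × Int)) → List (Int × Int) → List Int
  | _, [] => []
  | stks, (s, e) :: rest =>
    let fp := assignFindA stks s e (PySem.List.pyRange 0 max_stack 1)
    (if fp.2 = -1 then max_stack - 1 else fp.2) :: assignLoopA max_stack fp.1 rest

def assign_stacks (read_spans : List (Int × Int)) (max_stack : Int) : List Int :=
  assignLoopA max_stack ((PySem.List.pyRange 0 max_stack 1).map (fun _ => [])) read_spans

-- ===== PORT B =====
def pvNEG : Int := -(2 ^ 62)

-- segment tree over the tracks' last end positions: (min, leaf count, children)
inductive Seg where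
  | leaf : Int → Seg
  | node : Int → Nat → Seg → Seg → Seg

def Seg.mn : Seg → Int
  | .leaf v => v
  | .node m _ _ _ => m

def Seg.sz : Seg → Nat
  | .leaf _ => 1
  | .node _ n _ _ => n

def Seg.build : Nat → Seg
  | 0 => .leaf pvNEG
  | 1 => .leaf pvNEG
  | k + 2 => .node pvNEG (k + 2) (Seg.build ((k + 2) / 2)) (Seg.build (k + 2 - (k + 2) / 2))
  decreasing_by all_goals omega

-- leftmost leaf index whose value is ≤ s
def Seg.query : Seg → Int → Option Nat
  | .leaf v, s => if v > s then none else some 0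
  | .node m _ l r, s =>
    if m > s then none
    else
      match l.query s with
      | some j => some j
      | none =>
        match r.query s with
        | none => none
        | some j => some (l.sz + j)

def Seg.update : Seg → Nat → Int → Seg
  | .leaf _, _, v => .leaf v
  | .node _ n l r, i, v =>
    if i < l.sz then
      let l' := l.update i v
      .node (min l'.mn r.mn) n l' r
    else
      let r' := r.update (i - l.sz) v
      .node (min l.mn r'.mn) n l r'

def assignLoopB (max_stack : Int) : Seg → List (Int × Int) → List Int
  | _, [] => []
  | t, (s, e) :: rest =>
    match t.query s with
    | none => (max_stack - 1) :: assignLoopB max_stack t rest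
    | some i => (i : Int) :: assignLoopB max_stack (t.update i e) rest

def assign_stacks_alt (read_spans : List (Int × Int)) (max_stack : Int) : List Int :=
  if max_stack ≤ 0 then List.replicate read_spans.length (max_stack - 1)
  else assignLoopB max_stack (Seg.build max_stack.toNat) read_spans

-- ===== PRECONDITION & SPEC =====
def Spec_assign_stacks (read_spans : List (Int × Int)) (max_stack : Int) (out : List Int) : Prop := out = assign_stacks_alt read_spans max_stack
instance (read_spans : List (Int × Int)) (max_stack : Int) (out : List Int) : Decidable (Spec_assign_stacks read_spans max_stack out) := by unfold Spec_assign_stacks; infer_instance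

-- ===== CLAIM (what is proved, stated in full; the proofs are below) =====
def Claim_equal_assign_stacks : Prop := ∀ (read_spans : List (Int × Int)) (max_stack : Int), Dom_assign_stacks read_spans max_stack → Spec_assign_stacks read_spans max_stack (assign_stacks read_spans max_stack)

-- ===== LEMMAS AND PROOFS =====

def Seg.leaves : Seg → List Int
  | .leaf v => [v]
  | .node _ _ l r => l.leaves ++ r.leaves

def Seg.WF : Seg → Prop
  | .leaf _ => True
  | .node m n l r => l.WF ∧ r.WF ∧ m = min l.mn r.mn ∧ n = l.sz + r.sz

theorem seg_sz_eq (t : Seg) (h : t.WF) : t.sz = t.leaves.length := by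
  induction t with
  | leaf v => simp [Seg.sz, Seg.leaves]
  | node m n l r ihl ihr =>
    obtain ⟨hl, hr, _, hn⟩ := h
    simp only [Seg.sz, Seg.leaves, List.length_append]
    rw [hn, ihl hl, ihr hr]

theorem seg_mn_le_iff (t : Seg) (h : t.WF) (s : Int) :
    t.mn ≤ s ↔ ∃ v ∈ t.leaves, v ≤ s := by
  induction t with
  | leaf v => simp [Seg.mn, Seg.leaves]
  | node m n l r ihl ihr =>
    obtain ⟨hl, hr, hm, _⟩ := h
    rw [Seg.mn, hm, min_le_iff, ihl hl, ihr hr]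
    simp only [Seg.leaves, List.mem_append]
    constructor
    · rintro (⟨v, hv, hvs⟩ | ⟨v, hv, hvs⟩)
      · exact ⟨v, Or.inl hv, hvs⟩
      · exact ⟨v, Or.inr hv, hvs⟩
    · rintro ⟨v, hv | hv, hvs⟩
      · exact Or.inl ⟨v, hv, hvs⟩
      · exact Or.inr ⟨v, hv, hvs⟩

theorem seg_query_eq (t : Seg) (h : t.WF) (s : Int) :
    t.query s = t.leaves.findIdx? (fun v => decide (v ≤ s)) := by
  induction t with
  | leaf v =>
    by_cases hv : v ≤ s
    · simp [Seg.query, Seg.leaves, hv, not_lt.mpr hv]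
    · simp [Seg.query, Seg.leaves, hv, lt_of_not_ge hv]
  | node m n l r ihl ihr =>
    obtain ⟨hl, hr, hm, _⟩ := h
    rw [Seg.leaves, List.findIdx?_append, Seg.query, ihl hl, ihr hr]
    by_cases hms : s < m
    · have hlm : m ≤ l.mn := hm ▸ min_le_left _ _
      have hrm : m ≤ r.mn := hm ▸ min_le_right _ _
      have h1 : l.leaves.findIdx? (fun v => decide (v ≤ s)) = none := by
        rw [List.findIdx?_eq_none_iff]
        intro x hx
        simp only [decide_eq_false_iff_not]
        intro hxs
        have := (seg_mn_le_iff l hl s).mpr ⟨x, hx, hxs⟩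
        omega
      have h2 : r.leaves.findIdx? (fun v => decide (v ≤ s)) = none := by
        rw [List.findIdx?_eq_none_iff]
        intro x hx
        simp only [decide_eq_false_iff_not]
        intro hxs
        have := (seg_mn_le_iff r hr s).mpr ⟨x, hx, hxs⟩
        omega
      simp [hms, h1, h2]
    · rw [if_neg (by omega)]
      cases hfl : l.leaves.findIdx? (fun v => decide (v ≤ s)) with
      | some j => simp
      | none =>
        cases hfr : r.leaves.findIdx? (fun v => decide (v ≤ s)) with
        | none => simp
        | some j => simp [seg_sz_eq l hl, Nat.add_comm]

theorem seg_update_spec (t : Seg) (h : t.WF) (i : Nat) (v : Int) (hi : i < t.leaves.length) :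
    (t.update i v).WF ∧ (t.update i v).leaves = t.leaves.set i v ∧ (t.update i v).sz = t.sz := by
  induction t generalizing i with
  | leaf w =>
    simp only [Seg.leaves, List.length_cons, List.length_nil] at hi
    interval_cases i
    simp [Seg.update, Seg.WF, Seg.leaves, Seg.sz]
  | node m n l r ihl ihr =>
    obtain ⟨hl, hr, hm, hn⟩ := h
    have hlsz := seg_sz_eq l hl
    rw [Seg.update]
    by_cases hcase : i < l.sz
    · obtain ⟨w1, w2, w3⟩ := ihl hl i (by omega)
      rw [if_pos hcase]
      refine ⟨⟨w1, hr, rfl, by rw [w3]; exact hn⟩, ?_, rfl⟩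
      rw [Seg.leaves, Seg.leaves, w2, List.set_append, if_pos (by omega)]
    · have hi' : i - l.leaves.length < r.leaves.length := by
        rw [Seg.leaves, List.length_append] at hi; omega
      obtain ⟨w1, w2, w3⟩ := ihr hr (i - l.sz) (by omega)
      rw [if_neg hcase]
      refine ⟨⟨hl, w1, rfl, by rw [w3]; exact hn⟩, ?_, rfl⟩
      rw [Seg.leaves, Seg.leaves, w2, List.set_append, if_neg (by omega), hlsz]

theorem seg_build_spec (k : Nat) (h : 1 ≤ k) :
    (Seg.build k).WF ∧ (Seg.build k).leaves = List.replicate k pvNEG ∧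
    (Seg.build k).mn = pvNEG ∧ (Seg.build k).sz = k := by
  induction k using Seg.build.induct with
  | case1 => omega
  | case2 => rw [Seg.build]; exact ⟨trivial, rfl, rfl, rfl⟩
  | case3 k ih1 ih2 =>
    obtain ⟨a1, a2, a3, a4⟩ := ih1 (by omega)
    obtain ⟨b1, b2, b3, b4⟩ := ih2 (by omega)
    rw [Seg.build]
    refine ⟨⟨a1, b1, by rw [a3, b3]; simp, by rw [a4, b4]; omega⟩, ?_, rfl, rfl⟩
    rw [Seg.leaves, a2, b2, ← List.replicate_add]
    congr 1
    omega

-- abstraction of A's stacks: the last end of each track (pvNEG for an empty track)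
def lastEnd (row : List (Int × Int)) : Int :=
  match row.getLast? with
  | none => pvNEG
  | some p => p.2

def endsOf (stks : List (List (Int × Int))) : List Int := stks.map lastEnd

theorem find_spec (s e : Int) (hs : pvNEG ≤ s) :
    ∀ (post pre : List (List (Int × Int))),
    assignFindA (pre ++ post) s e
        (PySem.List.pyRange (pre.length : Int) ((pre.length : Int) + (post.length : Int)) 1) =
      (match (endsOf post).findIdx? (fun v => decide (v ≤ s)) with
      | none => (pre ++ post, -1)
      | some j => (pre ++ post.set j (post.getD j [] ++ [(s, e)]), ((pre.length + j : Nat) : Int))) := by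
  intro post
  induction post with
  | nil =>
    intro pre
    rw [PySem.List.pyRange_one_eq_nil (by simp)]
    simp [assignFindA, endsOf]
  | cons row0 rest ih =>
    intro pre
    rw [PySem.List.pyRange_one_cons (by push_cast [List.length_cons]; omega)]
    have hrow : PySem.List.pyGetD (pre ++ row0 :: rest) ((pre.length : Nat) : Int) [] = row0 := by
      rw [PySem.List.pyGetD_natCast, List.getD_eq_getElem?_getD,
        List.getElem?_append_right (le_refl _)]
      simp
    have hends : endsOf (row0 :: rest) = lastEnd row0 :: endsOf rest := rfl
    rcases hlast : row0.getLast? with _ | p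
    · -- empty track: A places here, its ends value pvNEG is ≤ s
      have hle : lastEnd row0 = pvNEG := by rw [lastEnd, hlast]
      simp only [assignFindA, hrow, hlast, hends, List.findIdx?_cons, hle]
      rw [if_pos (by simpa using hs)]
      simp only [Int.toNat_natCast, List.set_append, List.getD_cons_zero, List.set_cons_zero,
        Nat.add_zero]
      rw [if_neg (by omega)]
      simp
    · have hle : lastEnd row0 = p.2 := by rw [lastEnd, hlast]
      by_cases hps : p.2 ≤ s
      · simp only [assignFindA, hrow, hlast, hends, List.findIdx?_cons, hle]
        rw [if_pos hps, if_pos (by simpa using hps)]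
        simp only [Int.toNat_natCast, List.set_append, List.getD_cons_zero, List.set_cons_zero,
          Nat.add_zero]
        rw [if_neg (by omega)]
        simp
      · simp only [assignFindA, hrow, hlast, hends, List.findIdx?_cons, hle]
        rw [if_neg hps, if_neg (by simpa using hps)]
        have hre : pre ++ row0 :: rest = (pre ++ [row0]) ++ rest := by simp
        have harith : (pre.length : Int) + 1 = (((pre ++ [row0]).length : Nat) : Int) := by
          push_cast [List.length_append, List.length_cons, List.length_nil]; omega
        have harith2 : (pre.length : Int) + ((row0 :: rest).length : Int) =
            (((pre ++ [row0]).length : Nat) : Int) + (rest.length : Int) := by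
          push_cast [List.length_append, List.length_cons, List.length_nil]; omega
        rw [harith2, harith, hre, ih (pre ++ [row0])]
        cases hf : (endsOf rest).findIdx? (fun v => decide (v ≤ s)) with
        | none => simp
        | some j =>
          simp only [Option.map_some]
          refine Prod.ext ?_ ?_
          · simp
          · simp; omega

theorem loop_eq (m : Int) :
    ∀ (reads : List (Int × Int)) (stks : List (List (Int × Int))) (t : Seg),
    t.WF → t.leaves = endsOf stks → (stks.length : Int) = m →
    (∀ p ∈ reads, pvNEG ≤ p.1) →
    assignLoopA m stks reads = assignLoopB m t reads := by
  intro reads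
  induction reads with
  | nil => intro _ _ _ _ _ _; rfl
  | cons p rest ih =>
    intro stks t hwf hleaves hlen hreads
    obtain ⟨s, e⟩ := p
    have hs : pvNEG ≤ s := hreads (s, e) List.mem_cons_self
    have hrest : ∀ q ∈ rest, pvNEG ≤ q.1 := fun q hq => hreads q (List.mem_cons_of_mem _ hq)
    have hfind := find_spec s e hs stks []
    simp only [List.nil_append, List.length_nil, Nat.cast_zero, zero_add, hlen] at hfind
    have hq := seg_query_eq t hwf s
    rw [hleaves] at hq
    rw [assignLoopA, assignLoopB, hfind, hq]
    cases hfx : (endsOf stks).findIdx? (fun v => decide (v ≤ s)) with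
    | none =>
      norm_num
      exact ih stks t hwf hleaves hlen hrest
    | some j =>
      have hj : j < (endsOf stks).length :=
        (List.findIdx?_eq_some_iff_findIdx_eq.mp hfx).1
      have hj' : j < stks.length := by simpa [endsOf] using hj
      simp only [if_neg (by omega : ¬ ((j : Nat) : Int) = -1)]
      obtain ⟨w1, w2, w3⟩ := seg_update_spec t hwf j e (by rw [hleaves]; exact hj)
      rw [ih (stks.set j (stks.getD j [] ++ [(s, e)])) (t.update j e) w1 ?_ ?_ hrest]
      · rw [w2, hleaves, endsOf, endsOf, List.map_set]
        congr 1
        rw [lastEnd, List.getLast?_concat]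
      · rw [List.length_set]
        exact hlen

theorem loopA_empty (m : Int) (hm : m ≤ 0) (reads : List (Int × Int)) :
    assignLoopA m [] reads = List.replicate reads.length (m - 1) := by
  induction reads with
  | nil => rfl
  | cons p rest ih =>
    obtain ⟨s, e⟩ := p
    rw [assignLoopA, PySem.List.pyRange_one_eq_nil hm]
    simp [assignFindA, ih, List.replicate_succ]

-- ===== VERDICT (by name: the statement is the Claim_ definition above) =====
theorem assign_stacks_spec : Claim_equal_assign_stacks := by
  intro read_spans max_stack hdom
  unfold Spec_assign_stacks assign_stacks assign_stacks_alt
  by_cases hms : max_stack ≤ 0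
  · rw [if_pos hms, PySem.List.pyRange_one_eq_nil hms]
    simpa using loopA_empty max_stack hms read_spans
  · rw [if_neg hms]
    have hdom' : ∀ p ∈ read_spans, pvNEG ≤ p.1 := by
      simp only [Dom_assign_stacks, Bool.and_eq_true, List.all_eq_true, pvDomInt,
        decide_eq_true_eq] at hdom
      intro p hp
      have := (hdom.1 p hp).1
      unfold pvNEG
      omega
    obtain ⟨b1, b2, b3, b4⟩ := seg_build_spec max_stack.toNat (by omega)
    refine loop_eq max_stack read_spans _ _ b1 ?_ ?_ hdom'
    · rw [b2, endsOf, List.map_map]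
      have : (lastEnd ∘ fun _ : Int => ([] : List (Int × Int))) = fun _ : Int => pvNEG := by
        funext x
        simp [lastEnd]
      rw [this, List.map_const', PySem.List.length_pyRange_one]
      congr 1
      omega
    · rw [List.length_map, PySem.List.length_pyRange_one]
      omega
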